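-- pv_equiv track=rewrite | github.com/Suraj-Mohite/python-programming-practice | DSA/Recursion/R11_stepts.py | returnSteps
-- ===== SOURCE A (Python) =====
-- def returnSteps(no,cnt):
--     if no==0:
--         return [""],cnt
--     if no<0:
--         return [],cnt
--     path=[]
--     path1=returnSteps(no-1,cnt)
--     for i in path1[0]:
--         path.append("1"+i)
--         cnt+=1
--     path2=returnSteps(no-2,cnt)
--     for i in path2[0]:
--         path.append("2"+i)
--         cnt+=1
--     path3=returnSteps(no-3,cnt)
--     for i in path3[0]:
--         path.append("3"+i)
--         cnt+=1
--
--
--     return path,cnt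
-- ===== SOURCE B (Python) =====
-- def returnSteps(no, cnt):
--     # Bottom-up rolling DP: build each level's path list exactly once.
--     if no < 0:
--         return [], cnt
--     p3, p2, p1 = [], [], [""]
--     cur = [""]
--     for _ in range(no):
--         cur = ["1" + p for p in p1] + ["2" + p for p in p2] + ["3" + p for p in p3]
--         p3, p2, p1 = p2, p1, cur
--     return cur, cnt + (len(cur) if no > 0 else 0)
-- ===== Notes on version B (the rewrite author's own statement) =====
-- stated objective: alternative
-- what changed: Replaced the overlapping triple recursion (which recomputes each sub-level's path list many times and threads cnt through discarded return values) with a bottom-up rolling three-list DP that builds each level's path list exactly once; cnt is the input count plus the number of paths.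
import Mathlib
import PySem

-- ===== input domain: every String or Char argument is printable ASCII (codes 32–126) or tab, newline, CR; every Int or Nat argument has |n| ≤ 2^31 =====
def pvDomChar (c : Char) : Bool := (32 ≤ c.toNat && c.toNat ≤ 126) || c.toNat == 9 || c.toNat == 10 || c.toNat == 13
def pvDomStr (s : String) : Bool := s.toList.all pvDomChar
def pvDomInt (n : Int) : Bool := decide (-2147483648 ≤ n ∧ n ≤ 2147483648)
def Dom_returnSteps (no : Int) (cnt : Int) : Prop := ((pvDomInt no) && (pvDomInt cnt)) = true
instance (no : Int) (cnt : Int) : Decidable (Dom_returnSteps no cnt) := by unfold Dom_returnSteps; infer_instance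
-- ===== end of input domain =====

-- B replaces A's overlapping triple recursion by a bottom-up rolling DP that builds each
-- level's path list exactly once; same return value everywhere inside Pre_.

-- ===== PORT A =====
def returnSteps (no : Int) (cnt : Int) : List String × Int :=
  if no = 0 then ([""], cnt)
  else if no < 0 then ([], cnt)
  else
    let path1 := returnSteps (no - 1) cnt
    let s1 := path1.1.foldl (fun (st : List String × Int) i => (st.1 ++ ["1" ++ i], st.2 + 1)) (([] : List String), cnt)
    let path2 := returnSteps (no - 2) s1.2
    let s2 := path2.1.foldl (fun (st : List String × Int) i => (st.1 ++ ["2" ++ i], st.2 + 1)) s1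
    let path3 := returnSteps (no - 3) s2.2
    let s3 := path3.1.foldl (fun (st : List String × Int) i => (st.1 ++ ["3" ++ i], st.2 + 1)) s2
    (s3.1, s3.2)
termination_by no.toNat
decreasing_by all_goals omega

-- ===== PORT B =====
def returnSteps_alt (no : Int) (cnt : Int) : List String × Int :=
  if no < 0 then ([], cnt)
  else
    let st := (List.range no.toNat).foldl
      (fun (st : List String × List String × List String × List String) _ =>
        let cur := st.2.2.1.map (fun p => "1" ++ p) ++ st.2.1.map (fun p => "2" ++ p)
                     ++ st.1.map (fun p => "3" ++ p)
        (st.2.1, st.2.2.1, cur, cur))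
      (([] : List String), ([] : List String), ([""] : List String), ([""] : List String))
    let cur := st.2.2.2
    (cur, cnt + (if no > 0 then (cur.length : Int) else 0))

-- ===== PRECONDITION & SPEC =====
-- Pre_ excludes no ≥ 998, where the Python A raises RecursionError (its recursion depth is
-- no + 2, beyond CPython's default 1000-frame limit); A returns normally on all other inputs.
def Pre_returnSteps (no : Int) (cnt : Int) : Prop := no ≤ 997
instance (no : Int) (cnt : Int) : Decidable (Pre_returnSteps no cnt) := by unfold Pre_returnSteps; infer_instance
def pvWitness_returnSteps : Int × Int := (3, 0)

def Spec_returnSteps (no : Int) (cnt : Int) (out : List String × Int) : Prop := out = returnSteps_alt no cnt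
instance (no : Int) (cnt : Int) (out : List String × Int) : Decidable (Spec_returnSteps no cnt out) := by unfold Spec_returnSteps; infer_instance

-- ===== CLAIM (what is proved, stated in full; the proofs are below) =====
def Claim_equal_returnSteps : Prop := ∀ (no : Int) (cnt : Int), Dom_returnSteps no cnt → Pre_returnSteps no cnt → Spec_returnSteps no cnt (returnSteps no cnt)

-- ===== LEMMAS AND PROOFS =====

-- canonical path list (proof-only helper)
def pathsI (no : Int) : List String :=
  if no = 0 then [""]
  else if no < 0 then []
  else (pathsI (no - 1)).map (fun p => "1" ++ p) ++ (pathsI (no - 2)).map (fun p => "2" ++ p)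
         ++ (pathsI (no - 3)).map (fun p => "3" ++ p)
termination_by no.toNat
decreasing_by all_goals omega

lemma pathsI_zero : pathsI 0 = [""] := by
  rw [pathsI]; simp

lemma pathsI_pos {no : Int} (h : 0 < no) :
    pathsI no = (pathsI (no - 1)).map (fun p => "1" ++ p)
      ++ (pathsI (no - 2)).map (fun p => "2" ++ p)
      ++ (pathsI (no - 3)).map (fun p => "3" ++ p) := by
  rw [pathsI, if_neg (by omega), if_neg (by omega)]

lemma pathsI_neg {no : Int} (h : no < 0) : pathsI no = [] := by
  rw [pathsI]; rw [if_neg (by omega), if_pos h]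

lemma foldl_app (f : String → String) (l : List String) (acc : List String) (c : Int) :
    l.foldl (fun (st : List String × Int) i => (st.1 ++ [f i], st.2 + 1)) (acc, c)
      = (acc ++ l.map f, c + l.length) := by
  induction l generalizing acc c with
  | nil => simp
  | cons a t ih => simp [List.foldl_cons, ih]; omega

lemma returnSteps_eq (no cnt : Int) :
    returnSteps no cnt = (pathsI no, cnt + (if 0 < no then ((pathsI no).length : Int) else 0)) := by
  by_cases h0 : no = 0
  · subst h0; rw [returnSteps, pathsI_zero]; simp
  · by_cases hneg : no < 0
    · rw [returnSteps, pathsI_neg hneg]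
      simp [h0, hneg]
    · have hpos : 0 < no := by omega
      have h1 := returnSteps_eq (no - 1) cnt
      rw [returnSteps, if_neg h0, if_neg hneg]
      simp only [h1, foldl_app]
      have h2 := returnSteps_eq (no - 2) (cnt + ((pathsI (no - 1)).length : Int))
      simp only [h2]
      have h3 := returnSteps_eq (no - 3)
        (cnt + ((pathsI (no - 1)).length : Int) + ((pathsI (no - 2)).length : Int))
      simp only [h3]
      rw [pathsI_pos hpos]
      simp [hpos]
      omega
termination_by no.toNat
decreasing_by all_goals omega

lemma alt_inv (k : Nat) :
    (List.range k).foldl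
      (fun (st : List String × List String × List String × List String) _ =>
        let cur := st.2.2.1.map (fun p => "1" ++ p) ++ st.2.1.map (fun p => "2" ++ p)
                     ++ st.1.map (fun p => "3" ++ p)
        (st.2.1, st.2.2.1, cur, cur))
      (([] : List String), ([] : List String), ([""] : List String), ([""] : List String))
      = (pathsI ((k : Int) - 2), pathsI ((k : Int) - 1), pathsI (k : Int), pathsI (k : Int)) := by
  induction k with
  | zero =>
    simp only [List.range_zero, List.foldl_nil, Nat.cast_zero]
    rw [pathsI_neg (by norm_num), pathsI_neg (by norm_num), pathsI_zero]
  | succ k ih =>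
    rw [List.range_succ, List.foldl_append, ih]
    simp only [List.foldl_cons, List.foldl_nil]
    have e1 : ((k : Int) + 1) - 2 = (k : Int) - 1 := by ring
    have e2 : ((k : Int) + 1) - 1 = (k : Int) := by ring
    have hrec := pathsI_pos (no := (k : Int) + 1) (by omega)
    rw [e2] at hrec
    rw [show ((k : Int) + 1) - 2 = (k : Int) - 1 from by ring,
        show ((k : Int) + 1) - 3 = (k : Int) - 2 from by ring] at hrec
    push_cast
    rw [e1, e2, hrec]

lemma returnSteps_alt_eq (no cnt : Int) :
    returnSteps_alt no cnt = (pathsI no, cnt + (if 0 < no then ((pathsI no).length : Int) else 0)) := by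
  by_cases hneg : no < 0
  · rw [returnSteps_alt, if_pos hneg, pathsI_neg hneg]
    simp
  · rw [returnSteps_alt, if_neg hneg]
    simp only [alt_inv no.toNat]
    have : ((no.toNat : Int)) = no := Int.toNat_of_nonneg (by omega)
    rw [this]

-- ===== VERDICT (by name: the statement is the Claim_ definition above) =====
theorem returnSteps_spec : Claim_equal_returnSteps := by
  intro no cnt _ _
  unfold Spec_returnSteps
  rw [returnSteps_eq, returnSteps_alt_eq]
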